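-- pv_equiv track=rewrite | github.com/fedepicado/Comparacion-masiva-ADNmt | Comparación masiva ADNmt.py | find_duplicate_positions
-- ===== SOURCE A (Python) =====
-- def find_duplicate_positions(lst):
--     seen = {}
--     duplicates = []
--     for i, x in enumerate(lst):
--         if x in seen:
--             duplicates.append(seen[x])
--             duplicates.append(i)
--         else:
--             seen[x] = i
--     return duplicates
-- ===== SOURCE B (Python) =====
-- def find_duplicate_positions(lst):
--     first_index = {}
--     for i, x in enumerate(lst):
--         first_index.setdefault(x, i)
--     out = []
--     for i, x in enumerate(lst):
--         j = first_index[x]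
--         if i != j:
--             out.append(j)
--             out.append(i)
--     return out
-- ===== Notes on version B (the rewrite author's own statement) =====
-- stated objective: alternative
-- what changed: B splits A's single interleaved loop into two passes: one pass records only the earliest index of each value (setdefault), a second pass emits (first_index, i) for every position i that is not the first occurrence of its value.
import Mathlib
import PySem

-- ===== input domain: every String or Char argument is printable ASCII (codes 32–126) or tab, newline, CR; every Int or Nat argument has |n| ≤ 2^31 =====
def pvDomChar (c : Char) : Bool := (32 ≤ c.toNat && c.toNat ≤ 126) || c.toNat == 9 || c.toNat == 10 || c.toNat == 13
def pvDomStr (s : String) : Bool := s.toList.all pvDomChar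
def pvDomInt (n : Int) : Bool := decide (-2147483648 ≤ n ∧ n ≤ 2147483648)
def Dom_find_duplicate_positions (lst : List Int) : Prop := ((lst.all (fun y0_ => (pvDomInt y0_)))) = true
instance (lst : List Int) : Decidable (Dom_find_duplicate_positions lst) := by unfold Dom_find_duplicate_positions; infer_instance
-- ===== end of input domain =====

-- B replaces A's single interleaved seen/append loop by two passes: record earliest
-- indices first, then emit pairs; same output (objective: alternative decomposition).

-- ===== PORT A =====
def find_duplicate_positions (lst : List Int) : List Int :=
  ((PySem.List.enumerate lst).foldl
    (fun (st : PySem.Dict Int Int × List Int) p =>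
      if st.1.contains p.2 then (st.1, st.2 ++ [st.1.getD p.2 0, p.1])
      else (st.1.insert p.2 p.1, st.2))
    ((PySem.Dict.empty : PySem.Dict Int Int), ([] : List Int))).2

-- ===== PORT B =====
def find_duplicate_positions_alt (lst : List Int) : List Int :=
  let fi := (PySem.List.enumerate lst).foldl
    (fun (d : PySem.Dict Int Int) p => d.setdefault p.2 p.1)
    (PySem.Dict.empty : PySem.Dict Int Int)
  (PySem.List.enumerate lst).foldl
    (fun (out : List Int) p =>
      let j := fi.getD p.2 0
      if p.1 ≠ j then out ++ [j, p.1] else out) []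

-- ===== PRECONDITION & SPEC =====
def Spec_find_duplicate_positions (lst : List Int) (out : List Int) : Prop := out = find_duplicate_positions_alt lst
instance (lst : List Int) (out : List Int) : Decidable (Spec_find_duplicate_positions lst out) := by unfold Spec_find_duplicate_positions; infer_instance

-- ===== CLAIM (what is proved, stated in full; the proofs are below) =====
def Claim_equal_find_duplicate_positions : Prop := ∀ (lst : List Int), Dom_find_duplicate_positions lst → Spec_find_duplicate_positions lst (find_duplicate_positions lst)

-- ===== LEMMAS AND PROOFS =====

theorem setdefault_eq (d : PySem.Dict Int Int) (k v : Int) :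
    d.setdefault k v = if d.contains k then d else d.insert k v := by
  by_cases h : d.contains k
  · simp [PySem.Dict.setdefault, h]
  · simp only [PySem.Dict.setdefault, h, if_false, Bool.false_eq_true]
    apply PySem.Dict.ext
    rw [PySem.Dict.items_insert_of_not_contains _ _ (by simpa using h)]

-- the setdefault pass never changes the value stored for a key already present
theorem sd_get?_of_contains (l : List (Int × Int)) :
    ∀ (s : PySem.Dict Int Int) (k : Int), s.contains k = true →
    (l.foldl (fun (d : PySem.Dict Int Int) p => d.setdefault p.2 p.1) s).get? k = s.get? k := by
  induction l with
  | nil => intro s k _; rfl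
  | cons p t ih =>
    intro s k hk
    simp only [List.foldl_cons]
    by_cases hc : s.contains p.2
    · rw [show s.setdefault p.2 p.1 = s by rw [setdefault_eq, if_pos hc]]
      exact ih s k hk
    · have hne : k ≠ p.2 := by rintro rfl; rw [hk] at hc; exact hc rfl
      rw [show s.setdefault p.2 p.1 = s.insert p.2 p.1 by
        rw [setdefault_eq, if_neg hc]]
      rw [ih _ k (by simp [PySem.Dict.contains_insert, hk]),
        PySem.Dict.get?_insert_of_ne _ _ hne]

-- main invariant: A's loop over the remaining enumerated pairs, started from seen = s,
-- equals B's second pass over the same pairs using the setdefault fold of those pairs over s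
theorem main_inv (rest : List (Int × Int)) :
    ∀ (s : PySem.Dict Int Int) (acc : List Int),
    (∀ p ∈ rest, ∀ v : Int, s.get? p.2 = some v → v < p.1) →
    rest.Pairwise (fun p q => p.1 < q.1) →
    (rest.foldl
      (fun (st : PySem.Dict Int Int × List Int) p =>
        if st.1.contains p.2 then (st.1, st.2 ++ [st.1.getD p.2 0, p.1])
        else (st.1.insert p.2 p.1, st.2)) (s, acc)).2
    = rest.foldl
      (fun (out : List Int) p =>
        let j := (rest.foldl (fun (d : PySem.Dict Int Int) q => d.setdefault q.2 q.1) s).getD p.2 0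
        if p.1 ≠ j then out ++ [j, p.1] else out) acc := by
  induction rest with
  | nil => intro s acc _ _; rfl
  | cons p t ih =>
    intro s acc hlt hpw
    obtain ⟨i, x⟩ := p
    simp only [List.foldl_cons]
    by_cases hc : s.contains x = true
    · -- x already seen: both sides append [s[x], i]
      obtain ⟨v, hv⟩ := Option.isSome_iff_exists.mp (by
        rw [← PySem.Dict.contains_eq_isSome_get? s x]; exact hc)
      have hF : (t.foldl (fun (d : PySem.Dict Int Int) q => d.setdefault q.2 q.1) s).getD x 0
          = s.getD x 0 := by
        rw [PySem.Dict.getD_eq_get?_getD, sd_get?_of_contains t s x hc,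
          ← PySem.Dict.getD_eq_get?_getD]
      have hvlt : v < i := hlt (i, x) (by simp) v hv
      have hne : i ≠ s.getD x 0 := by
        rw [PySem.Dict.getD_of_get?_eq_some s 0 hv]; omega
      rw [show s.setdefault x i = s by rw [setdefault_eq, if_pos hc]]
      simp only [hc, if_true]
      rw [ih s (acc ++ [s.getD x 0, i])
        (fun q hq v' hv' => hlt q (List.mem_cons_of_mem _ hq) v' hv') hpw.of_cons]
      rw [hF, if_pos hne]
    · -- first occurrence: A inserts, B appends nothing (fi[x] = i)
      have hF : (t.foldl (fun (d : PySem.Dict Int Int) q => d.setdefault q.2 q.1)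
          (s.insert x i)).getD x 0 = i := by
        rw [PySem.Dict.getD_eq_get?_getD,
          sd_get?_of_contains t _ x (PySem.Dict.contains_insert_self _ _ _),
          PySem.Dict.get?_insert_self]
        rfl
      rw [show s.setdefault x i = s.insert x i by rw [setdefault_eq, if_neg hc]]
      simp only [hc, Bool.false_eq_true, if_false]
      rw [ih (s.insert x i) acc ?_ hpw.of_cons]
      · rw [hF, if_neg (by simp)]
      · intro q hq v hv
        rw [PySem.Dict.get?_insert] at hv
        split_ifs at hv with hqx
        · cases hv; exact (List.pairwise_cons.mp hpw).1 q hq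
        · exact hlt q (List.mem_cons_of_mem _ hq) v hv

-- ===== VERDICT (by name: the statement is the Claim_ definition above) =====
theorem find_duplicate_positions_spec : Claim_equal_find_duplicate_positions := by
  intro lst _
  unfold Spec_find_duplicate_positions find_duplicate_positions find_duplicate_positions_alt
  exact main_inv (PySem.List.enumerate lst) PySem.Dict.empty []
    (by intro p _ v hv; simp [PySem.Dict.get?_empty] at hv)
    (PySem.List.pairwise_lt_enumerate lst 0)
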